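-- pv_equiv track=rewrite | github.com/getlar/Hackaton | AOC2024/5/main.py | is_update_valid_with_hashmap
-- ===== SOURCE A (Python) =====
-- def is_update_valid_with_hashmap(update, ordering_map):
--     seen = set()
--     for page in update:
--         if page in ordering_map:
--             for must_follow in ordering_map[page]:
--                 if must_follow in seen:
--                     return False
--         seen.add(page)
--     return True
-- ===== SOURCE B (Python) =====
-- def is_update_valid_with_hashmap(update, ordering_map):
--     first = {}
--     for i, page in enumerate(update):
--         first.setdefault(page, i)
--     for i, page in enumerate(update):
--         for must_follow in ordering_map.get(page, []):
--             j = first.get(must_follow)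
--             if j is not None and j < i:
--                 return False
--     return True
-- ===== Notes on version B (the rewrite author's own statement) =====
-- stated objective: alternative
-- what changed: Replaces the incrementally-grown 'seen' set with a precomputed first-occurrence index table built once via setdefault; a violation is then detected by comparing the stored first index of must_follow with the current position, so no per-step set mutation remains.
import Mathlib
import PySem

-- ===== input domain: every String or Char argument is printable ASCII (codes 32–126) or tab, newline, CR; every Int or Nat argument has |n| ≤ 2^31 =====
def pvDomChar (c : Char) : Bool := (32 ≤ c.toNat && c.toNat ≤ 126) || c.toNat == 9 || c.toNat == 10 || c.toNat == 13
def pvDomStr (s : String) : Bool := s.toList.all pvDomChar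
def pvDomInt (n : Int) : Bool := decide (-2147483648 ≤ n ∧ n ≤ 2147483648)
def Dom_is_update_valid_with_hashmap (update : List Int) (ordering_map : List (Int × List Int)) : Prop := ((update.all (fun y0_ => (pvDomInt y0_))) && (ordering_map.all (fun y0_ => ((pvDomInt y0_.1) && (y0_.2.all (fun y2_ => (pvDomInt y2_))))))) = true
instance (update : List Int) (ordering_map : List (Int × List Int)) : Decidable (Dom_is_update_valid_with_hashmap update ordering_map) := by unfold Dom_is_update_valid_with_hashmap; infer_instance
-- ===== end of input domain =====

-- B replaces A's incrementally-grown 'seen' set by a first-occurrence index table built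
-- once with setdefault, then detects a violation by an index comparison (objective: alternative).

-- ===== PORT A =====
-- the loop of A: walk update, growing 'seen'; return False as soon as some must_follow is in seen
def pvA_go (m : List (Int × List Int)) : List Int → PySem.Set Int → Bool
  | [], _ => true
  | page :: rest, seen =>
    match (PySem.Dict.mk m).get? page with
    | some fs =>
      if fs.any (fun mf => PySem.Set.contains seen mf) then false
      else pvA_go m rest (PySem.Set.add seen page)
    | none => pvA_go m rest (PySem.Set.add seen page)

def is_update_valid_with_hashmap (update : List Int) (ordering_map : List (Int × List Int)) : Bool :=
  pvA_go ordering_map update PySem.Set.empty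

-- ===== PORT B =====
-- first pass of B: first-occurrence index of every page, via setdefault over enumerate
def pvB_index (update : List Int) : PySem.Dict Int Int :=
  (PySem.List.enumerate update).foldl (fun d p => d.setdefault p.2 p.1) PySem.Dict.empty

-- second pass of B: for each (i, page), no must_follow may have a recorded index < i
def pvB_check (m : List (Int × List Int)) (idx : PySem.Dict Int Int) (p : Int × Int) : Bool :=
  ((PySem.Dict.mk m).getD p.2 []).all (fun mf =>
    match idx.get? mf with
    | some j => !(j < p.1)
    | none => true)

def is_update_valid_with_hashmap_alt (update : List Int) (ordering_map : List (Int × List Int)) : Bool :=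
  let idx := pvB_index update
  (PySem.List.enumerate update).all (pvB_check ordering_map idx)

-- ===== PRECONDITION & SPEC =====
def Spec_is_update_valid_with_hashmap (update : List Int) (ordering_map : List (Int × List Int)) (out : Bool) : Prop := out = is_update_valid_with_hashmap_alt update ordering_map
instance (update : List Int) (ordering_map : List (Int × List Int)) (out : Bool) : Decidable (Spec_is_update_valid_with_hashmap update ordering_map out) := by unfold Spec_is_update_valid_with_hashmap; infer_instance

-- ===== CLAIM (what is proved, stated in full; the proofs are below) =====
def Claim_equal_is_update_valid_with_hashmap : Prop := ∀ (update : List Int) (ordering_map : List (Int × List Int)), Dom_is_update_valid_with_hashmap update ordering_map → Spec_is_update_valid_with_hashmap update ordering_map (is_update_valid_with_hashmap update ordering_map)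

-- ===== LEMMAS AND PROOFS =====

theorem pv_setdefault_ne (d : PySem.Dict Int Int) (a : Int) (s : Int) (x : Int) (h : x ≠ a) :
    (d.setdefault a s).get? x = d.get? x := by
  exact PySem.Dict.get?_setdefault_of_ne d s h

-- the setdefault-fold over enumerate records the FIRST occurrence index of each element
theorem pv_idx_fold (xs : List Int) (s : Int) (d : PySem.Dict Int Int) (x : Int) :
    ((PySem.List.enumerate xs s).foldl (fun d p => d.setdefault p.2 p.1) d).get? x
      = ((d.get? x).or (if x ∈ xs then some (s + (List.idxOf x xs : Int)) else none)) := by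
  induction xs generalizing s d with
  | nil => simp [PySem.List.enumerate_nil]
  | cons a xs ih =>
    rw [PySem.List.enumerate_cons]
    simp only [List.foldl_cons]
    rw [ih]
    by_cases hxa : x = a
    · subst hxa
      rw [PySem.Dict.get?_setdefault_self]
      cases hd : d.get? x <;> simp [List.idxOf_cons_eq _ rfl]
    · have hax : a ≠ x := fun heq => hxa heq.symm
      rw [pv_setdefault_ne d a s x hxa]
      by_cases hm : x ∈ xs
      · simp only [List.mem_cons, hxa, hm, if_pos, or_true]
        rw [List.idxOf_cons_ne _ hax]
        cases d.get? x <;> simp <;> omega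
      · simp [hm, hxa]

theorem pv_index_get (u : List Int) (x : Int) :
    (pvB_index u).get? x = (if x ∈ u then some ((List.idxOf x u : Nat) : Int) else none) := by
  rw [pvB_index, pv_idx_fold, PySem.Dict.get?_empty]
  simp

-- per-element agreement: 'must_follow already seen' = 'first occurrence index before position |pre|'
theorem pv_check_elem (u pre rest : List Int) (h : pre ++ rest = u) (mf : Int) :
    (match (pvB_index u).get? mf with
      | some j => !(j < ((pre.length : Nat) : Int))
      | none => true)
      = !(PySem.Set.contains (PySem.Set.ofList pre) mf) := by
  have hpre : pre <+: u := ⟨rest, h⟩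
  have hmem : mf ∈ pre ↔ List.idxOf mf u < pre.length :=
    List.IsPrefix.mem_iff_idxOf_lt_length hpre mf
  by_cases hu : mf ∈ u
  · simp [pv_index_get, hu, hmem]
  · have hp : mf ∉ pre := fun hc => hu (hpre.subset hc)
    simp [pv_index_get, hu, hp]

theorem pv_ofList_snoc (pre : List Int) (p : Int) :
    PySem.Set.ofList (pre ++ [p]) = PySem.Set.add (PySem.Set.ofList pre) p := by
  simp [PySem.Set.ofList_eq_foldl, List.foldl_append]

-- main loop invariant: A's remaining loop with seen = set(pre) equals B's check over the rest
theorem pv_main (m : List (Int × List Int)) (u : List Int) :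
    ∀ rest pre : List Int, pre ++ rest = u →
      pvA_go m rest (PySem.Set.ofList pre)
        = (PySem.List.enumerate rest ((pre.length : Nat) : Int)).all (pvB_check m (pvB_index u)) := by
  intro rest
  induction rest with
  | nil => intro pre _; simp [pvA_go, PySem.List.enumerate_nil]
  | cons page rest ih =>
    intro pre h
    have h' : (pre ++ [page]) ++ rest = u := by simpa using h
    have hlen : (((pre ++ [page]).length : Nat) : Int) = ((pre.length : Nat) : Int) + 1 := by
      simp
    have hih := ih (pre ++ [page]) h'
    rw [pv_ofList_snoc, hlen] at hih
    rw [PySem.List.enumerate_cons, List.all_cons]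
    have hcheck : pvB_check m (pvB_index u) (((pre.length : Nat) : Int), page)
        = match (PySem.Dict.mk m).get? page with
          | some fs => !(fs.any (fun mf => PySem.Set.contains (PySem.Set.ofList pre) mf))
          | none => true := by
      rw [pvB_check]
      cases hg : (PySem.Dict.mk m).get? page with
      | none => simp [PySem.Dict.getD, hg]
      | some fs =>
        simp only [PySem.Dict.getD, hg, Option.getD_some]
        have hfg : (fun mf => (match (pvB_index u).get? mf with
              | some j => !(j < ((pre.length : Nat) : Int))
              | none => true))
            = (fun mf => !(PySem.Set.contains (PySem.Set.ofList pre) mf)) :=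
          funext (pv_check_elem u pre (page :: rest) h)
        rw [hfg]
        clear hg
        induction fs with
        | nil => simp
        | cons f fs ihf => simp only [List.all_cons, List.any_cons, Bool.not_or, ihf]
    rw [pvA_go, hcheck]
    cases hg : (PySem.Dict.mk m).get? page with
    | none => simp only [Bool.true_and]; exact hih
    | some fs =>
      dsimp only
      cases hv : fs.any (fun mf => PySem.Set.contains (PySem.Set.ofList pre) mf) with
      | true => simp
      | false => simp only [Bool.not_false, Bool.true_and, if_neg Bool.false_ne_true]; exact hih

-- ===== VERDICT (by name: the statement is the Claim_ definition above) =====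
theorem is_update_valid_with_hashmap_spec : Claim_equal_is_update_valid_with_hashmap := by
  intro update ordering_map _
  unfold Spec_is_update_valid_with_hashmap
  rw [is_update_valid_with_hashmap, is_update_valid_with_hashmap_alt]
  have := pv_main ordering_map update update [] rfl
  simpa [PySem.Set.ofList, PySem.Set.empty] using this
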